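-- pv_equiv track=rewrite | github.com/Lortas102066/Python-Basic | Week3/workshop03.py | addition_table
-- ===== SOURCE A (Python) =====
-- def addition_table(numbers):
--     """
--     >>> addition_table([2, 5, -3, 7])
--     [[3, 6, -2, 8], [4, 7, -1, 9], [5, 8, 0, 10]]
--     >>> addition_table([1])
--     [[2], [3], [4]]
--     >>> addition_table([-2, -5, -9, -12, -23])
--     [[-1, -4, -8, -11, -22], [0, -3, -7, -10, -21], [1, -2, -6, -9, -20]]
--     """
--     pass
--     add_nums = [1, 2, 3]
--     answer3 = []
--     for i in add_nums:
--         row = [num + i for num in numbers]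
--         answer3.append(row)
--     return answer3
-- ===== SOURCE B (Python) =====
-- def addition_table(numbers):
--     rows = [[], [], []]
--     for num in numbers:
--         rows[0].append(num + 1)
--         rows[1].append(num + 2)
--         rows[2].append(num + 3)
--     return rows
-- ===== Notes on version B (the rewrite author's own statement) =====
-- stated objective: alternative
-- what changed: B makes a single number-major pass appending num+1,num+2,num+3 to three explicit row accumulators, instead of A's offset-major loop building each row with a fresh comprehension.
import Mathlib
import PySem

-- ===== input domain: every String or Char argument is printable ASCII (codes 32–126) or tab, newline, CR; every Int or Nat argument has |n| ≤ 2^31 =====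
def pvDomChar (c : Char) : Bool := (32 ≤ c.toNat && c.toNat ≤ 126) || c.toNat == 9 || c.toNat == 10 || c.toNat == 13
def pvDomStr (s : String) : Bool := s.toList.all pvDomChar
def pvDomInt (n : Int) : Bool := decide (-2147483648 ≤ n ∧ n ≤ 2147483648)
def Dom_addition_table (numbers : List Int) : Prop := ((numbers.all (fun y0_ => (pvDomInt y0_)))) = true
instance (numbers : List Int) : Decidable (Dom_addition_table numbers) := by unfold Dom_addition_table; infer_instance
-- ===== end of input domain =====

-- B replaces A's offset-major loop (one comprehension per offset) with a single
-- number-major pass appending to three explicit row accumulators; objective: alternative.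

-- ===== PORT A =====
-- for i in [1,2,3]: answer3.append([num + i for num in numbers])
def addition_table (numbers : List Int) : List (List Int) :=
  ([1, 2, 3] : List Int).foldl
    (fun answer3 i => answer3 ++ [numbers.map (fun num => num + i)]) []

-- ===== PORT B =====
-- rows = [[],[],[]]; for num in numbers: append num+1/num+2/num+3 to the three rows
def addition_table_alt (numbers : List Int) : List (List Int) :=
  let rows := numbers.foldl
    (fun (rows : List Int × List Int × List Int) num =>
      (rows.1 ++ [num + 1], rows.2.1 ++ [num + 2], rows.2.2 ++ [num + 3]))
    ([], [], [])
  [rows.1, rows.2.1, rows.2.2]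

-- ===== PRECONDITION & SPEC =====
def Spec_addition_table (numbers : List Int) (out : List (List Int)) : Prop := out = addition_table_alt numbers
instance (numbers : List Int) (out : List (List Int)) : Decidable (Spec_addition_table numbers out) := by unfold Spec_addition_table; infer_instance

-- ===== CLAIM (what is proved, stated in full; the proofs are below) =====
def Claim_equal_addition_table : Prop := ∀ (numbers : List Int), Dom_addition_table numbers → Spec_addition_table numbers (addition_table numbers)

-- ===== LEMMAS AND PROOFS =====
theorem addition_table_alt_foldl (ns : List Int) (a b c : List Int) :
    ns.foldl (fun (rows : List Int × List Int × List Int) num =>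
        (rows.1 ++ [num + 1], rows.2.1 ++ [num + 2], rows.2.2 ++ [num + 3])) (a, b, c)
      = (a ++ ns.map (· + 1), b ++ ns.map (· + 2), c ++ ns.map (· + 3)) := by
  induction ns generalizing a b c with
  | nil => simp
  | cons x xs ih => simp [List.foldl, ih]

-- ===== VERDICT (by name: the statement is the Claim_ definition above) =====
theorem addition_table_spec : Claim_equal_addition_table := by
  intro numbers _
  unfold Spec_addition_table addition_table addition_table_alt
  simp [List.foldl, addition_table_alt_foldl]
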